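-- pv_equiv track=rewrite | github.com/MeriDK/info_protect | lab2/lab2.py | x_sequence
-- ===== SOURCE A (Python) =====
-- def x_sequence(cycle=1):
--     if cycle == 1:
--         return list(range(16))
--     elif cycle == 2:
--         return [(1 + 5 * i) % 16 for i in range(16)]
--     elif cycle == 3:
--         return [(5 + 3 * i) % 16 for i in range(16)]
--     else:
--         return [7 * i % 16 for i in range(16)]
-- ===== SOURCE B (Python) =====
-- def x_sequence(cycle=1):
--     # Walk the additive cycle statefully instead of computing each term by
--     # a closed-form multiplication: x_{k+1} = (x_k + step) % 16.
--     start, step = {1: (0, 1), 2: (1, 5), 3: (5, 3)}.get(cycle, (0, 7))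
--     seq = []
--     x = start
--     for _ in range(16):
--         seq.append(x)
--         x = (x + step) % 16
--     return seq
-- ===== Notes on version B (the rewrite author's own statement) =====
-- stated objective: alternative
-- what changed: Replaces the four-way branch chain of independent closed-form comprehensions (start plus step times the index, reduced mod the table size, per index) by a stateful additive walk: a single accumulator loop that repeatedly adds the step modulo the table size and appends, with the start/step pair chosen by one table lookup.
import Mathlib
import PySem

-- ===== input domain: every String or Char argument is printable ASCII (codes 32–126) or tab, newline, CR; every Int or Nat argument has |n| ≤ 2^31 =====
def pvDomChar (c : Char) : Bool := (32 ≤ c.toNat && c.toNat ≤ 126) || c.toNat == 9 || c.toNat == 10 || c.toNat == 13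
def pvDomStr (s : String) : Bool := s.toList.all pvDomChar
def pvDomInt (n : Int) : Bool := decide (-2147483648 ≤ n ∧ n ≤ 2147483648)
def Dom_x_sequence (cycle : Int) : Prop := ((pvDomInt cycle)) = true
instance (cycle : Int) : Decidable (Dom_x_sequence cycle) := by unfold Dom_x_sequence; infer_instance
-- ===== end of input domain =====

-- B walks the additive cycle with a stateful accumulator (x = (x+step) % 16 each round)
-- instead of A's four independent per-index closed-form comprehensions (alternative).

-- ===== PORT A =====
def x_sequence (cycle : Int) : List Int :=
  if cycle == 1 then
    PySem.List.pyRange 0 16 1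
  else if cycle == 2 then
    (PySem.List.pyRange 0 16 1).map (fun i => PySem.Int.mod (1 + 5 * i) 16)
  else if cycle == 3 then
    (PySem.List.pyRange 0 16 1).map (fun i => PySem.Int.mod (5 + 3 * i) 16)
  else
    (PySem.List.pyRange 0 16 1).map (fun i => PySem.Int.mod (7 * i) 16)

-- ===== PORT B =====
def x_sequence_alt (cycle : Int) : List Int :=
  let p := (PySem.Dict.ofList [((1 : Int), ((0 : Int), (1 : Int))), (2, (1, 5)), (3, (5, 3))]).getD cycle (0, 7)
  let st := (PySem.List.pyRange 0 16 1).foldl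
    (fun (st : List Int × Int) _ => (st.1 ++ [st.2], PySem.Int.mod (st.2 + p.2) 16))
    ([], p.1)
  st.1

-- ===== PRECONDITION & SPEC =====
def Spec_x_sequence (cycle : Int) (out : List Int) : Prop := out = x_sequence_alt cycle
instance (cycle : Int) (out : List Int) : Decidable (Spec_x_sequence cycle out) := by unfold Spec_x_sequence; infer_instance

-- ===== CLAIM (what is proved, stated in full; the proofs are below) =====
def Claim_equal_x_sequence : Prop := ∀ (cycle : Int), Dom_x_sequence cycle → Spec_x_sequence cycle (x_sequence cycle)

-- ===== LEMMAS AND PROOFS =====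

-- ===== VERDICT (by name: the statement is the Claim_ definition above) =====
theorem x_sequence_spec : Claim_equal_x_sequence := by
  intro cycle _
  unfold Spec_x_sequence x_sequence x_sequence_alt
  by_cases h1 : cycle = 1
  · subst h1; decide
  · by_cases h2 : cycle = 2
    · subst h2; decide
    · by_cases h3 : cycle = 3
      · subst h3; decide
      · have e1 : ((1 : Int) == cycle) = false := beq_eq_false_iff_ne.mpr (fun h => h1 h.symm)
        have e2 : ((2 : Int) == cycle) = false := beq_eq_false_iff_ne.mpr (fun h => h2 h.symm)
        have e3 : ((3 : Int) == cycle) = false := beq_eq_false_iff_ne.mpr (fun h => h3 h.symm)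
        simp [h1, h2, h3, e1, e2, e3, PySem.Dict.ofList, PySem.Dict.getD, PySem.Dict.get?,
          PySem.Dict.update, PySem.Dict.insert, PySem.Dict.empty, PySem.Dict.contains, List.find?]
        decide
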